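-- pv_equiv track=rewrite | github.com/nhayato/ant-book | fence_repair/fence_repair/__init__.py | solve_by_priority_queue
-- ===== SOURCE A (Python) =====
-- from heapq import heappop, heappush
--
-- def solve_by_priority_queue(N: int, L: list[int]) -> int:
--     ans = 0
--     priority_queue = []
--     for i in range(N):
--         heappush(priority_queue, L[i])
--
--     while len(priority_queue) > 1:
--         # 一番短い板、次に短い板を取り出す
--         l1 = heappop(priority_queue)
--         l2 = heappop(priority_queue)
--
--         ans += l1 + l2
--         heappush(priority_queue, l1 + l2)
--
--     return ans
-- ===== SOURCE B (Python) =====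
-- def solve_by_priority_queue(N: int, L: list[int]) -> int:
--     # sorted working list instead of a binary heap: sort the first N planks once,
--     # then repeatedly merge the two front (smallest) planks and re-insert the sum
--     # at its sorted position.
--     xs = sorted(L[:max(N, 0)])
--     ans = 0
--     while len(xs) > 1:
--         s = xs[0] + xs[1]
--         ans += s
--         rest = xs[2:]
--         i = 0
--         while i < len(rest) and rest[i] < s:
--             i += 1
--         xs = rest[:i] + [s] + rest[i:]
--     return ans
-- ===== Notes on version B (the rewrite author's own statement) =====
-- stated objective: alternative
-- what changed: Replaced the heapq binary heap by sorting the first N planks once and then re-inserting each merged sum at its sorted position in a flat list (sort-once + ordered insertion instead of heap push/pop).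
import Mathlib
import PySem

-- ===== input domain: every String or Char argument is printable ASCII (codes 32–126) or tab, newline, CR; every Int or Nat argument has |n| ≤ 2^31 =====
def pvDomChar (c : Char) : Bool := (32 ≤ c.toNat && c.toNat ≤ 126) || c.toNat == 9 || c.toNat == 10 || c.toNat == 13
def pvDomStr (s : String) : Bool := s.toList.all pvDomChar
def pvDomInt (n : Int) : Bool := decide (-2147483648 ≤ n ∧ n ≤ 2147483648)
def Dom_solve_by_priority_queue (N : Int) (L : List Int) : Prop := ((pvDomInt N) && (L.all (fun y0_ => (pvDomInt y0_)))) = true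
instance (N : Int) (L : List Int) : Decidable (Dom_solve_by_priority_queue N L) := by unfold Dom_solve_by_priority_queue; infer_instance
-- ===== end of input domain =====

-- B replaces A's binary heap (heapq) by a once-sorted list into which each merged sum is
-- re-inserted at its sorted position; equivalence is proved for N ≤ len(L) (otherwise A raises).

-- ===== PORT A =====
-- CPython heapq._siftdown, transliterated (heap[pos] = newitem deferred exactly as in the source).
def pySiftdown (heap : List Int) (startpos pos : Nat) (newitem : Int) : List Int :=
  if _h : startpos < pos then
    let parentpos := (pos - 1) / 2
    let parent := heap.getD parentpos 0
    if newitem < parent then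
      pySiftdown (heap.set pos parent) startpos parentpos newitem
    else heap.set pos newitem
  else heap.set pos newitem
termination_by pos
decreasing_by omega

-- CPython heapq._siftup, transliterated (newitem passed explicitly; equals heap[pos] at entry).
def pySiftup (heap : List Int) (startpos pos : Nat) (newitem : Int) : List Int :=
  if _h : 2*pos+1 < heap.length then
    let childpos := if 2*pos+2 < heap.length && !(heap.getD (2*pos+1) 0 < heap.getD (2*pos+2) 0)
                    then 2*pos+2 else 2*pos+1
    pySiftup (heap.set pos (heap.getD childpos 0)) startpos childpos newitem
  else pySiftdown (heap.set pos newitem) startpos pos newitem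
termination_by heap.length - pos
decreasing_by simp only [List.length_set]; split <;> omega

-- heapq.heappush
def pyHeappush (heap : List Int) (item : Int) : List Int :=
  pySiftdown (heap ++ [item]) 0 heap.length item

-- heapq.heappop; none = IndexError on an empty list (never reached under the loop guard).
def pyHeappop (heap : List Int) : Option (Int × List Int) :=
  match heap.getLast? with
  | none => none
  | some lastelt =>
    let h1 := heap.dropLast
    if h1.isEmpty then some (lastelt, h1)
    else some (h1.getD 0 0, pySiftup (h1.set 0 lastelt) 0 0 lastelt)

-- the while-loop of A; fuel = current heap size (the loop removes one element per
-- iteration, so this bound is exact and the 0-fuel branch is never the loop exit)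
def pvAWhile (fuel : Nat) (pq : List Int) (ans : Int) : Int :=
  match fuel with
  | 0 => ans
  | fuel' + 1 =>
    if pq.length > 1 then
      match pyHeappop pq with
      | none => ans
      | some (l1, pq1) =>
        match pyHeappop pq1 with
        | none => ans
        | some (l2, pq2) => pvAWhile fuel' (pyHeappush pq2 (l1 + l2)) (ans + l1 + l2)
    else ans

-- the heap-building for-loop; L[i] (IndexError, excluded by Pre_) is the .getD 0
-- default, never reached under Pre_
def pvHeapify (N : Int) (L : List Int) : List Int :=
  (PySem.List.pyRange 0 N 1).foldl
    (fun pq i => pyHeappush pq ((PySem.List.pyGet? L i).getD 0)) ([] : List Int)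

def solve_by_priority_queue (N : Int) (L : List Int) : Int :=
  pvAWhile (pvHeapify N L).length (pvHeapify N L) 0

-- ===== PORT B =====
-- the inner index scan: i = 0; while i < len(rest) and rest[i] < s: i += 1
def pvInsIdx (rest : List Int) (s : Int) : Nat :=
  match rest with
  | [] => 0
  | x :: t => if x < s then pvInsIdx t s + 1 else 0

-- while len(xs) > 1: s = xs[0]+xs[1]; ans += s; rest = xs[2:]; xs = rest[:i] + [s] + rest[i:]
def pvBLoop (xs : List Int) (ans : Int) : Int :=
  match xs with
  | a :: b :: rest =>
    let s := a + b
    let i := pvInsIdx rest s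
    pvBLoop (rest.take i ++ s :: rest.drop i) (ans + s)
  | _ => ans
termination_by xs.length
decreasing_by simp

def solve_by_priority_queue_alt (N : Int) (L : List Int) : Int :=
  pvBLoop (PySem.List.sorted (PySem.List.slice L none (some (max N 0))) id) 0

-- ===== PRECONDITION & SPEC =====
-- Pre_ excludes exactly N > len(L), where A's L[i] raises IndexError.
def Pre_solve_by_priority_queue (N : Int) (L : List Int) : Prop := N ≤ L.length

instance (N : Int) (L : List Int) : Decidable (Pre_solve_by_priority_queue N L) := by
  unfold Pre_solve_by_priority_queue; infer_instance

def pvWitness_solve_by_priority_queue : Int × List Int := (3, [3, 5, 2])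

def Spec_solve_by_priority_queue (N : Int) (L : List Int) (out : Int) : Prop := out = solve_by_priority_queue_alt N L
instance (N : Int) (L : List Int) (out : Int) : Decidable (Spec_solve_by_priority_queue N L out) := by unfold Spec_solve_by_priority_queue; infer_instance

-- ===== CLAIM (what is proved, stated in full; the proofs are below) =====
def Claim_equal_solve_by_priority_queue : Prop := ∀ (N : Int) (L : List Int), Dom_solve_by_priority_queue N L → Pre_solve_by_priority_queue N L → Spec_solve_by_priority_queue N L (solve_by_priority_queue N L)

-- ===== LEMMAS AND PROOFS =====

theorem pv_length_siftdown (heap : List Int) (s p : Nat) (n : Int) :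
    (pySiftdown heap s p n).length = heap.length := by
  fun_induction pySiftdown heap s p n <;> simp_all [List.length_set]

theorem pv_length_siftup (heap : List Int) (s p : Nat) (n : Int) :
    (pySiftup heap s p n).length = heap.length := by
  fun_induction pySiftup heap s p n <;> simp_all [List.length_set, pv_length_siftdown]

theorem pv_length_push (heap : List Int) (x : Int) :
    (pyHeappush heap x).length = heap.length + 1 := by
  simp [pyHeappush, pv_length_siftdown]

-- the binary-heap invariant of heapq
def pvIsHeap (l : List Int) : Prop :=
  ∀ i, 0 < i → i < l.length → l.getD ((i-1)/2) 0 ≤ l.getD i 0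

theorem pv_getD_set_ne (l : List Int) (i j : Nat) (v : Int) (h : i ≠ j) (hj : j < l.length) :
    (l.set i v).getD j 0 = l.getD j 0 := by
  rw [List.getD_eq_getElem l 0 hj, List.getD_eq_getElem _ 0 (by simp [hj]), List.getElem_set_ne h]

theorem pv_getD_set_self (l : List Int) (i : Nat) (v : Int) (hi : i < l.length) :
    (l.set i v).getD i 0 = v := by
  rw [List.getD_eq_getElem _ 0 (by simp [hi])]; simp

theorem pv_coe_set (l : List Int) (i : Nat) (v : Int) (h : i < l.length) :
    ((l.set i v : List Int) : Multiset Int) = v ::ₘ (l : Multiset Int).erase (l.getD i 0) := by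
  have hd : l.getD i 0 = l[i] := List.getD_eq_getElem l 0 h
  have hl : l = l.take i ++ l[i] :: l.drop (i+1) := by
    conv_lhs => rw [← List.take_append_drop i l]
    congr 1
    exact List.drop_eq_getElem_cons h
  have h2 : (l : Multiset Int) = l[i] ::ₘ ((l.take i ++ l.drop (i+1) : List Int) : Multiset Int) := by
    conv_lhs => rw [hl]
    exact Multiset.coe_eq_coe.mpr List.perm_middle
  rw [hd, h2, Multiset.erase_cons_head, List.set_eq_take_cons_drop v h]
  exact Multiset.coe_eq_coe.mpr List.perm_middle

theorem pv_siftdown_coe (heap : List Int) (p : Nat) (n : Int) (hp : p < heap.length) :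
    ((pySiftdown heap 0 p n : List Int) : Multiset Int)
      = n ::ₘ (heap : Multiset Int).erase (heap.getD p 0) := by
  fun_induction pySiftdown heap 0 p n with
  | case1 heap pos _h pp par hlt ih =>
    have hpp : pp < pos := by omega
    have h1 : pp < (heap.set pos par).length := by simpa using lt_trans hpp hp
    rw [ih h1, pv_getD_set_ne heap pos pp par (by omega) (lt_trans hpp hp),
        pv_coe_set heap pos par hp, Multiset.erase_cons_head]
  | case2 heap pos _h pp par hlt =>
    exact pv_coe_set heap pos n hp
  | case3 heap pos _h =>
    exact pv_coe_set heap pos n hp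

theorem pv_siftup_coe (heap : List Int) (p : Nat) (n : Int) (hp : p < heap.length) :
    ((pySiftup heap 0 p n : List Int) : Multiset Int)
      = n ::ₘ (heap : Multiset Int).erase (heap.getD p 0) := by
  fun_induction pySiftup heap 0 p n with
  | case1 heap pos _h c ih =>
    have hc_lt : c < heap.length := by
      simp only [c]; split
      · next hcond => simp only [Bool.and_eq_true, decide_eq_true_eq] at hcond; omega
      · omega
    have hc_ne : pos ≠ c := by simp only [c]; split <;> omega
    have h1 : c < (heap.set pos (heap.getD c 0)).length := by rw [List.length_set]; exact hc_lt
    rw [ih h1, pv_getD_set_ne heap pos c _ hc_ne hc_lt,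
        pv_coe_set heap pos (heap.getD c 0) hp, Multiset.erase_cons_head]
  | case2 heap pos _h =>
    rw [pv_siftdown_coe _ pos n (by simpa using hp),
        pv_getD_set_self heap pos n hp, pv_coe_set heap pos n hp, Multiset.erase_cons_head]

theorem pv_push_coe (heap : List Int) (x : Int) :
    ((pyHeappush heap x : List Int) : Multiset Int) = x ::ₘ (heap : Multiset Int) := by
  unfold pyHeappush
  have hlen : heap.length < (heap ++ [x]).length := by simp
  have hco : ((heap ++ [x] : List Int) : Multiset Int) = x ::ₘ (heap : Multiset Int) :=
    Multiset.coe_eq_coe.mpr (List.perm_append_singleton x heap)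
  have hg : (heap ++ [x]).getD heap.length 0 = x := by
    rw [List.getD_eq_getElem _ 0 hlen]
    simp
  rw [pv_siftdown_coe _ _ _ hlen, hg, hco, Multiset.erase_cons_head]

theorem pv_siftdown_isHeap (heap : List Int) (p : Nat) (n : Int)
    (hp : p < heap.length)
    (H1 : ∀ i, 0 < i → i < heap.length → i ≠ p → (i-1)/2 ≠ p → heap.getD ((i-1)/2) 0 ≤ heap.getD i 0)
    (H1' : ∀ c, 0 < c → c < heap.length → c ≠ p → (c-1)/2 = p → n ≤ heap.getD c 0)
    (H2 : ∀ c, 0 < c → c < heap.length → c ≠ p → (c-1)/2 = p → 0 < p → heap.getD ((p-1)/2) 0 ≤ heap.getD c 0) :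
    pvIsHeap (pySiftdown heap 0 p n) := by
  fun_induction pySiftdown heap 0 p n with
  | case1 heap pos _h pp par hlt ih =>
    have hpp : pp < pos := by omega
    have hppl : pp < heap.length := lt_trans hpp hp
    have hlen : (heap.set pos par).length = heap.length := by simp
    have hgne : ∀ j, j ≠ pos → j < heap.length → (heap.set pos par).getD j 0 = heap.getD j 0 :=
      fun j hj hjl => pv_getD_set_ne heap pos j par (fun h => hj h.symm) hjl
    have hgpos : (heap.set pos par).getD pos 0 = par := pv_getD_set_self heap pos par hp
    apply ih
    · omega
    · -- H1 for (heap.set pos par, pp)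
      intro i hi hil hip hpar
      rw [hlen] at hil
      by_cases hipos : i = pos
      · exfalso; apply hpar; rw [hipos]
      · rw [hgne i hipos hil]
        by_cases hparpos : (i-1)/2 = pos
        · rw [hparpos, hgpos]
          exact H2 i hi hil hipos hparpos _h
        · rw [hgne _ hparpos (by omega : (i-1)/2 < heap.length)]
          exact H1 i hi hil hipos hparpos
    · -- H1'
      intro c hc hcl hcp hcpar
      rw [hlen] at hcl
      by_cases hcpos : c = pos
      · rw [hcpos, hgpos]; exact le_of_lt hlt
      · rw [hgne c hcpos hcl]
        have := H1 c hc hcl hcpos (by rw [hcpar]; omega)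
        rw [hcpar] at this
        exact le_trans (le_of_lt hlt) this
    · -- H2
      intro c hc hcl hcp hcpar hpppos
      rw [hlen] at hcl
      have hpppne : (pp-1)/2 ≠ pos := by omega
      have hpppl : (pp-1)/2 < heap.length := by omega
      have hstep : heap.getD ((pp-1)/2) 0 ≤ heap.getD pp 0 :=
        H1 pp hpppos hppl (by omega) (by omega)
      rw [hgne _ hpppne hpppl]
      by_cases hcpos : c = pos
      · rw [hcpos, hgpos]; exact hstep
      · rw [hgne c hcpos hcl]
        have h2 := H1 c hc hcl hcpos (by rw [hcpar]; omega)
        rw [hcpar] at h2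
        exact le_trans hstep h2
  | case2 heap pos _h pp par hnlt =>
    intro i hi hil
    rw [List.length_set] at hil
    have hgne : ∀ j, j ≠ pos → j < heap.length → (heap.set pos n).getD j 0 = heap.getD j 0 :=
      fun j hj hjl => pv_getD_set_ne heap pos j n (fun h => hj h.symm) hjl
    have hgpos : (heap.set pos n).getD pos 0 = n := pv_getD_set_self heap pos n hp
    by_cases hipos : i = pos
    · subst hipos
      have hppne : (i-1)/2 ≠ i := by omega
      rw [hgpos, hgne _ hppne (by omega)]
      exact le_of_not_gt hnlt
    · rw [hgne i hipos hil]
      by_cases hparpos : (i-1)/2 = pos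
      · rw [hparpos, hgpos]; exact H1' i hi hil hipos hparpos
      · rw [hgne _ hparpos (by omega)]; exact H1 i hi hil hipos hparpos
  | case3 heap pos _h =>
    have hpos : pos = 0 := by omega
    subst hpos
    intro i hi hil
    rw [List.length_set] at hil
    have hgne : ∀ j, j ≠ 0 → j < heap.length → (heap.set 0 n).getD j 0 = heap.getD j 0 :=
      fun j hj hjl => pv_getD_set_ne heap 0 j n (fun h => hj h.symm) hjl
    have hgpos : (heap.set 0 n).getD 0 0 = n := pv_getD_set_self heap 0 n hp
    rw [hgne i (by omega) hil]
    by_cases hpar : (i-1)/2 = 0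
    · rw [hpar, hgpos]; exact H1' i hi hil (by omega) hpar
    · rw [hgne _ hpar (by omega)]; exact H1 i hi hil (by omega) hpar

theorem pv_siftup_isHeap (heap : List Int) (p : Nat) (n : Int)
    (hp : p < heap.length)
    (I1 : ∀ i, 0 < i → i < heap.length → (i-1)/2 ≠ p → heap.getD ((i-1)/2) 0 ≤ heap.getD i 0)
    (I2 : 0 < p → ∀ c, 0 < c → c < heap.length → (c-1)/2 = p → heap.getD ((p-1)/2) 0 ≤ heap.getD c 0) :
    pvIsHeap (pySiftup heap 0 p n) := by
  fun_induction pySiftup heap 0 p n with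
  | case1 heap pos _h c ih =>
    have hc_cases : c = 2*pos+1 ∨ (c = 2*pos+2 ∧ c < heap.length ∧ heap.getD c 0 ≤ heap.getD (2*pos+1) 0) := by
      simp only [c]; split
      · next hcond =>
        simp only [Bool.and_eq_true, Bool.not_eq_eq_eq_not, Bool.not_true, decide_eq_true_eq,
          decide_eq_false_iff_not, not_lt] at hcond
        exact Or.inr ⟨rfl, hcond.1, hcond.2⟩
      · exact Or.inl rfl
    have hclt : c < heap.length := by
      rcases hc_cases with h | h
      · omega
      · exact h.2.1
    have hcgt : pos < c := by rcases hc_cases with h | h <;> omega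
    have hcpar : (c-1)/2 = pos := by rcases hc_cases with h | h <;> omega
    have hmin : ∀ j, 0 < j → j < heap.length → (j-1)/2 = pos → heap.getD c 0 ≤ heap.getD j 0 := by
      intro j hj0 hjl hjpar
      have hj : j = 2*pos+1 ∨ j = 2*pos+2 := by omega
      rcases hc_cases with ⟨hc1⟩ | ⟨hc2, _, hcle⟩
      · rcases hj with hj | hj
        · rw [hc1, hj]
        · -- c = 2pos+1 picked, j = 2pos+2 in range: condition was false
          subst hj
          have : heap.getD (2*pos+1) 0 < heap.getD (2*pos+2) 0 := by
            by_contra hnot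
            have hcond : (decide (2*pos+2 < heap.length) && !decide (heap.getD (2*pos+1) 0 < heap.getD (2*pos+2) 0)) = true := by
              simp only [Bool.and_eq_true, Bool.not_eq_eq_eq_not, Bool.not_true, decide_eq_true_eq,
                decide_eq_false_iff_not]
              exact ⟨hjl, hnot⟩
            have : c = 2*pos+2 := by simp only [c]; rw [dif_pos hcond]
            omega
          rw [hc1]; exact le_of_lt this
      · rcases hj with hj | hj
        · rw [hj]; exact hcle
        · rw [hc2, hj]
    have hlen : (heap.set pos (heap.getD c 0)).length = heap.length := by simp
    have hgne : ∀ j, j ≠ pos → j < heap.length → (heap.set pos (heap.getD c 0)).getD j 0 = heap.getD j 0 :=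
      fun j hj hjl => pv_getD_set_ne heap pos j _ (fun h => hj h.symm) hjl
    have hgpos : (heap.set pos (heap.getD c 0)).getD pos 0 = heap.getD c 0 :=
      pv_getD_set_self heap pos _ hp
    apply ih
    · rw [hlen]; exact hclt
    · -- I1 for (heap.set pos hc, c)
      intro i hi hil hip
      rw [hlen] at hil
      by_cases hipos : i = pos
      · subst hipos
        have h0 : 0 < i := hi
        have hppne : (i-1)/2 ≠ i := by omega
        rw [hgpos, hgne _ hppne (by omega)]
        exact I2 hi c (by omega) hclt hcpar
      · rw [hgne i hipos hil]
        by_cases hparpos : (i-1)/2 = pos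
        · rw [hparpos, hgpos]; exact hmin i hi hil hparpos
        · rw [hgne _ hparpos (by omega)]; exact I1 i hi hil hparpos
    · -- I2 for (heap.set pos hc, c)
      intro _ gc hgc hgcl hgcpar
      rw [hlen] at hgcl
      have hgcpos : pos < gc := by omega
      rw [hcpar, hgpos, hgne gc (by omega) hgcl]
      have := I1 gc hgc hgcl (by omega)
      rw [hgcpar] at this
      exact this
  | case2 heap pos _h =>
    apply pv_siftdown_isHeap _ pos n (by simpa using hp)
    · intro i hi hil hip hpar
      rw [List.length_set] at hil
      rw [pv_getD_set_ne heap pos i n (fun h => hip h.symm) hil,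
          pv_getD_set_ne heap pos _ n (fun h => hpar h.symm) (by omega)]
      exact I1 i hi hil hpar
    · intro c hc hcl hcp hcpar
      rw [List.length_set] at hcl
      omega
    · intro c hc hcl hcp hcpar
      rw [List.length_set] at hcl
      omega

theorem pv_push_isHeap (heap : List Int) (x : Int) (hh : pvIsHeap heap) :
    pvIsHeap (pyHeappush heap x) := by
  unfold pyHeappush
  apply pv_siftdown_isHeap _ _ _ (by simp)
  · intro i hi hil hip hpar
    rw [List.length_append, List.length_singleton] at hil
    have hi' : i < heap.length := by omega
    rw [List.getD_append _ _ _ _ hi', List.getD_append _ _ _ _ (by omega)]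
    exact hh i hi hi'
  · intro c hc hcl hcp hcpar
    rw [List.length_append, List.length_singleton] at hcl
    omega
  · intro c hc hcl hcp hcpar
    rw [List.length_append, List.length_singleton] at hcl
    omega

theorem pv_heap_min (heap : List Int) (hh : pvIsHeap heap) :
    ∀ x ∈ heap, heap.getD 0 0 ≤ x := by
  have key : ∀ i, i < heap.length → heap.getD 0 0 ≤ heap.getD i 0 := by
    intro i
    induction i using Nat.strong_induction_on with
    | _ i ih =>
      intro hil
      rcases Nat.eq_zero_or_pos i with h0 | h0
      · subst h0; exact le_refl _
      · exact le_trans (ih ((i-1)/2) (by omega) (by omega)) (hh i h0 hil)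
  intro x hx
  obtain ⟨i, hi, hgx⟩ := List.mem_iff_getElem.mp hx
  have := key i hi
  rwa [List.getD_eq_getElem _ 0 hi, hgx] at this

theorem pv_pop_spec (heap : List Int) (hne : heap ≠ []) :
    ∃ t, pyHeappop heap = some (heap.getD 0 0, t) ∧
      (heap : Multiset Int) = heap.getD 0 0 ::ₘ (t : Multiset Int) ∧
      t.length = heap.length - 1 ∧ (pvIsHeap heap → pvIsHeap t) := by
  have hgl : heap.getLast? = some (heap.getLast hne) := List.getLast?_eq_some_getLast hne
  have hdec : heap.dropLast ++ [heap.getLast hne] = heap := List.dropLast_append_getLast hne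
  by_cases hemp : heap.dropLast.isEmpty
  · obtain ⟨a, ha⟩ : ∃ a, heap = [a] := by
      refine ⟨heap.getLast hne, ?_⟩
      conv_lhs => rw [← hdec]
      rw [List.isEmpty_iff.mp hemp]
      rfl
    subst ha
    exact ⟨[], rfl, rfl, rfl, fun _ => by intro i hi hil; simp at hil⟩
  · set last := heap.getLast hne with hlast
    set h1 := heap.dropLast with hh1
    have hne1 : h1 ≠ [] := by simpa [List.isEmpty_iff] using hemp
    have h1pos : 0 < h1.length := List.length_pos_iff.mpr hne1
    have hlenh : heap.length = h1.length + 1 := by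
      conv_lhs => rw [← hdec]
      simp
    have hg0 : heap.getD 0 0 = h1.getD 0 0 := by
      conv_lhs => rw [← hdec]
      rw [List.getD_append _ _ _ _ h1pos]
    set H := h1.set 0 last with hH
    have hHlen : H.length = h1.length := by simp [hH]
    have hg0H : H.getD 0 0 = last := pv_getD_set_self h1 0 last h1pos
    have hcoH : (H : Multiset Int) = last ::ₘ (h1 : Multiset Int).erase (h1.getD 0 0) :=
      pv_coe_set h1 0 last h1pos
    have hmem : h1.getD 0 0 ∈ h1 := by
      rw [List.getD_eq_getElem _ 0 h1pos]
      exact List.getElem_mem h1pos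
    refine ⟨pySiftup H 0 0 last, ?_, ?_, ?_, ?_⟩
    · unfold pyHeappop
      rw [hgl]
      simp only [← hh1, ← hH, hemp]
      rw [hg0]
      rfl
    · rw [pv_siftup_coe H 0 last (by omega), hg0H, hcoH, Multiset.erase_cons_head]
      have hco : (heap : Multiset Int) = last ::ₘ (h1 : Multiset Int) := by
        conv_lhs => rw [← hdec]
        exact Multiset.coe_eq_coe.mpr (List.perm_append_singleton _ _)
      rw [hco, hg0, Multiset.cons_swap]
      exact congrArg (fun m => last ::ₘ m) (Multiset.cons_erase hmem).symm
    · rw [pv_length_siftup, hHlen]; omega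
    · intro hhp
      apply pv_siftup_isHeap H 0 last (by omega)
      · intro i hi hil hip
        rw [hHlen] at hil
        have hgi : ∀ j, j ≠ 0 → j < h1.length → H.getD j 0 = heap.getD j 0 := by
          intro j hj hjl
          rw [hH, pv_getD_set_ne h1 0 j last (fun h => hj h.symm) hjl]
          conv_rhs => rw [← hdec]
          rw [List.getD_append _ _ _ _ hjl]
        rw [hgi i (by omega) hil, hgi _ hip (by omega)]
        exact hhp i hi (by omega)
      · intro h0; exact absurd h0 (lt_irrefl 0)

theorem pvSortedEq (xs ys : List Int) (hperm : ys.Perm xs)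
    (hp : List.Pairwise (· ≤ ·) ys) : PySem.List.sorted xs id = ys := by
  exact List.Perm.eq_of_pairwise (fun a b _ _ hab hba => le_antisymm hab hba)
    (by simpa using PySem.List.sorted_pairwise xs id) hp
    ((PySem.List.sorted_perm xs id false).trans hperm.symm)

theorem pvInsIdx_pairwise (rest : List Int) (s : Int)
    (hs : List.Pairwise (· ≤ ·) rest) :
    List.Pairwise (· ≤ ·)
      (rest.take (pvInsIdx rest s) ++ s :: rest.drop (pvInsIdx rest s)) := by
  induction rest with
  | nil => simp [pvInsIdx]
  | cons x t ih =>
    by_cases hx : x < s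
    · simp only [pvInsIdx, if_pos hx, List.take_succ_cons, List.drop_succ_cons, List.cons_append]
      refine List.Pairwise.cons ?_ (ih hs.of_cons)
      intro b hb
      rcases List.mem_append.mp hb with hb | hb
      · exact List.rel_of_pairwise_cons hs (List.mem_of_mem_take hb)
      · rcases List.mem_cons.mp hb with hb | hb
        · exact le_of_lt (hb ▸ hx)
        · exact List.rel_of_pairwise_cons hs (List.mem_of_mem_drop hb)
    · simp only [pvInsIdx, if_neg hx, List.take_zero, List.drop_zero, List.nil_append]
      refine List.Pairwise.cons ?_ hs
      intro b hb
      rcases List.mem_cons.mp hb with hb | hb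
      · omega
      · exact le_trans (by omega) (List.rel_of_pairwise_cons hs hb)

theorem pv_sorted_pairwise' (l : List Int) :
    List.Pairwise (· ≤ ·) (PySem.List.sorted l id) := by
  simpa using PySem.List.sorted_pairwise l id

theorem pv_main_aux (n : Nat) : ∀ pq ans, pq.length = n → pvIsHeap pq →
    pvAWhile n pq ans = pvBLoop (PySem.List.sorted pq id) ans := by
  induction n with
  | zero =>
    intro pq ans hlen hh
    have hnil : PySem.List.sorted pq id = [] := by
      have := List.Perm.length_eq (PySem.List.sorted_perm pq id false)
      rw [hlen] at this
      exact List.length_eq_zero_iff.mp this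
    rw [pvAWhile, hnil]
    simp [pvBLoop]
  | succ n ih =>
    intro pq ans hlen hh
    by_cases hn : pq.length > 1
    case neg =>
      rw [pvAWhile, if_neg hn]
      have hlen' : (PySem.List.sorted pq id).length ≤ 1 := by
        rw [List.Perm.length_eq (PySem.List.sorted_perm pq id false)]; omega
      match hm : PySem.List.sorted pq id with
      | [] => simp [pvBLoop]
      | [a] => simp [pvBLoop]
      | a :: b :: t => rw [hm] at hlen'; simp at hlen'
    case pos =>
      have hne : pq ≠ [] := by intro h; rw [h] at hn; simp at hn
      obtain ⟨pq1, hpop1, hco1, hlen1, hheap1⟩ := pv_pop_spec pq hne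
      have hheap1' := hheap1 hh
      have hne1 : pq1 ≠ [] := by
        rw [← List.length_pos_iff]; omega
      obtain ⟨pq2, hpop2, hco2, hlen2, hheap2⟩ := pv_pop_spec pq1 hne1
      have hheap2' := hheap2 hheap1'
      set m1 := pq.getD 0 0 with hm1
      set m2 := pq1.getD 0 0 with hm2
      set s := m1 + m2 with hsdef
      -- the two heads are the two minima
      have hmin1 : ∀ x ∈ pq, m1 ≤ x := pv_heap_min pq hh
      have hmin2 : ∀ x ∈ pq1, m2 ≤ x := pv_heap_min pq1 hheap1'
      have hmem_pq1 : ∀ x, x ∈ pq1 → x ∈ pq := by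
        intro x hx
        have : x ∈ (pq : Multiset Int) := by
          rw [hco1]; exact Multiset.mem_cons_of_mem (by simpa using hx)
        simpa using this
      have hmem_pq2 : ∀ x, x ∈ pq2 → x ∈ pq1 := by
        intro x hx
        have : x ∈ (pq1 : Multiset Int) := by
          rw [hco2]; exact Multiset.mem_cons_of_mem (by simpa using hx)
        simpa using this
      -- left side: one iteration of A's loop
      have hA : pvAWhile (n+1) pq ans = pvAWhile n (pyHeappush pq2 s) (ans + m1 + m2) := by
        rw [pvAWhile, if_pos hn]
        split
        · next heq => rw [hpop1] at heq; simp at heq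
        · next l1 pq1' heq =>
          rw [hpop1] at heq
          simp only [Option.some.injEq, Prod.mk.injEq] at heq
          obtain ⟨h1, h2⟩ := heq
          subst h1; subst h2
          split
          · next heq2 => rw [hpop2] at heq2; simp at heq2
          · next l2 pq2' heq2 =>
            rw [hpop2] at heq2
            simp only [Option.some.injEq, Prod.mk.injEq] at heq2
            obtain ⟨h1, h2⟩ := heq2
            subst h1; subst h2
            rfl
      -- sorted pq starts with the two minima
      have hs1 : PySem.List.sorted pq id = m1 :: m2 :: PySem.List.sorted pq2 id := by
        apply pvSortedEq
        · apply Multiset.coe_eq_coe.mp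
          have hc : ((PySem.List.sorted pq2 id : List Int) : Multiset Int) = (pq2 : Multiset Int) :=
            Multiset.coe_eq_coe.mpr (PySem.List.sorted_perm pq2 id false)
          rw [← Multiset.cons_coe, ← Multiset.cons_coe, hc, hco1, hco2]
        · refine List.Pairwise.cons ?_ (List.Pairwise.cons ?_ (pv_sorted_pairwise' pq2))
          · intro b hb
            rcases List.mem_cons.mp hb with hb | hb
            · subst hb
              exact hmin1 m2 (hmem_pq1 m2 (by rw [hm2, List.getD_eq_getElem _ 0 (List.length_pos_iff.mpr hne1)]; exact List.getElem_mem _))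
            · have hb2 : b ∈ pq2 := (PySem.List.sorted_perm pq2 id false).mem_iff.mp hb
              exact hmin1 b (hmem_pq1 b (hmem_pq2 b hb2))
          · intro b hb
            have hb2 : b ∈ pq2 := (PySem.List.sorted_perm pq2 id false).mem_iff.mp hb
            exact hmin2 b (hmem_pq2 b hb2)
      -- B's re-insertion of the sum equals sorting the pushed heap
      set rest := PySem.List.sorted pq2 id with hrest
      set i := pvInsIdx rest s with hi
      have hs2 : PySem.List.sorted (pyHeappush pq2 s) id = rest.take i ++ s :: rest.drop i := by
        apply pvSortedEq
        · apply Multiset.coe_eq_coe.mp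
          have hper : (rest.take i ++ s :: rest.drop i).Perm (s :: rest) := by
            have := List.perm_middle (a := s) (l₁ := rest.take i) (l₂ := rest.drop i)
            rwa [List.take_append_drop] at this
          rw [Multiset.coe_eq_coe.mpr hper, pv_push_coe, Multiset.cons_coe]
          exact Multiset.coe_eq_coe.mpr ((PySem.List.sorted_perm pq2 id false).cons s)
        · exact pvInsIdx_pairwise rest s (pv_sorted_pairwise' pq2)
      have hB : pvBLoop (PySem.List.sorted pq id) ans
          = pvBLoop (rest.take i ++ s :: rest.drop i) (ans + s) := by
        rw [hs1, pvBLoop]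
      rw [hA, hB, ← hs2]
      have hlen' : (pyHeappush pq2 s).length = n := by
        rw [pv_length_push]; omega
      have heq : ans + m1 + m2 = ans + s := by rw [hsdef]; ring
      rw [heq]
      exact ih _ _ hlen' (pv_push_isHeap pq2 s hheap2')

theorem pv_main (pq : List Int) (ans : Int) (hh : pvIsHeap pq) :
    pvAWhile pq.length pq ans = pvBLoop (PySem.List.sorted pq id) ans :=
  pv_main_aux pq.length pq ans rfl hh

theorem pv_fold_isHeap (is : List Int) (g : Int → Int) (acc : List Int) (hh : pvIsHeap acc) :
    pvIsHeap (is.foldl (fun pq i => pyHeappush pq (g i)) acc) := by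
  induction is generalizing acc with
  | nil => exact hh
  | cons x t ih => exact ih _ (pv_push_isHeap acc (g x) hh)

theorem pv_fold_coe (is : List Int) (g : Int → Int) (acc : List Int) :
    ((is.foldl (fun pq i => pyHeappush pq (g i)) acc : List Int) : Multiset Int)
      = (acc : Multiset Int) + ((is.map g : List Int) : Multiset Int) := by
  induction is generalizing acc with
  | nil => simp
  | cons x t ih =>
    rw [List.foldl_cons, ih, pv_push_coe, List.map_cons, ← Multiset.cons_coe,
        Multiset.cons_add, Multiset.add_cons]

theorem pv_pyRange01_neg (N : Int) (h : N < 0) : PySem.List.pyRange 0 N 1 = [] := by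
  rw [PySem.List.pyRange_of_pos 0 N one_pos, if_neg (by omega)]
  rfl

theorem pv_built_take (L : List Int) (n : Nat) (hn : n ≤ L.length) :
    (List.range n).map (fun k => (PySem.List.pyGet? L ((k : Nat) : Int)).getD 0) = L.take n := by
  apply List.ext_getElem
  · simp [hn]
  · intro j h1 h2
    simp only [List.getElem_map, List.getElem_range, List.getElem_take]
    rw [PySem.List.pyGet?_natCast]
    rw [List.getElem?_eq_getElem (by simp at h1; omega)]
    rfl

theorem pv_empty_isHeap : pvIsHeap ([] : List Int) := by
  intro i hi hil; simp at hil

-- ===== VERDICT (by name: the statement is the Claim_ definition above) =====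
theorem solve_by_priority_queue_spec : Claim_equal_solve_by_priority_queue := by
  unfold Claim_equal_solve_by_priority_queue
  intro N L _hdom hpre
  unfold Pre_solve_by_priority_queue at hpre
  unfold Spec_solve_by_priority_queue solve_by_priority_queue solve_by_priority_queue_alt
  by_cases hN : 0 ≤ N
  · have hNn : N = (N.toNat : Int) := (Int.toNat_of_nonneg hN).symm
    have hnle : N.toNat ≤ L.length := by omega
    have hr : PySem.List.pyRange 0 N 1 = List.map (fun k : Nat => (k : Int)) (List.range N.toNat) := by
      conv_lhs => rw [hNn]
      exact PySem.List.pyRange_zero_natCast N.toNat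
    set pq := pvHeapify N L with hpq
    have hco : (pq : Multiset Int) = ((L.take N.toNat : List Int) : Multiset Int) := by
      rw [hpq, pvHeapify, pv_fold_coe, hr, List.map_map]
      rw [show ((fun i => (PySem.List.pyGet? L i).getD 0) ∘ fun k : Nat => (k : Int))
            = fun k : Nat => (PySem.List.pyGet? L ((k : Nat) : Int)).getD 0 from rfl]
      rw [pv_built_take L N.toNat hnle]
      simp
    have hhp : pvIsHeap pq := pv_fold_isHeap _ _ _ pv_empty_isHeap
    have hper : (PySem.List.sorted (L.take N.toNat) id).Perm pq :=
      Multiset.coe_eq_coe.mp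
        (by rw [Multiset.coe_eq_coe.mpr (PySem.List.sorted_perm (L.take N.toNat) id false), ← hco])
    have hspq : PySem.List.sorted pq id = PySem.List.sorted (L.take N.toNat) id :=
      pvSortedEq pq _ hper (pv_sorted_pairwise' _)
    rw [pv_main pq 0 hhp, hspq, max_eq_left hN, PySem.List.slice_to L hN]
  · have hneg : N < 0 := by omega
    have hmax : max N 0 = 0 := max_eq_right (le_of_lt hneg)
    rw [hmax, PySem.List.slice_to L (le_refl 0)]
    have hnil : PySem.List.sorted (List.take (0:Int).toNat L) id = [] :=
      pvSortedEq _ _ (by simp) List.Pairwise.nil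
    have hheapify : pvHeapify N L = [] := by
      rw [pvHeapify, pv_pyRange01_neg N hneg]
      rfl
    rw [hnil, hheapify]
    simp [pvAWhile, pvBLoop]
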